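-- pv_equiv track=rewrite | github.com/pypi-data/pypi-mirror-365 | packages/hakkero-dataloader/hakkero-dataloader-1.2.23.tar.gz/hakkero-dataloader-1.2.23/hakkero/dataset/misc.py | unpack_packed_tokens
-- ===== SOURCE A (Python) =====
-- from typing import List
--
-- def unpack_packed_tokens(packed: List[int], bos_id: int, eos_id: int) -> List[List[int]]:
--     samples: List[List[int]] = []
--     cur: List[int] = []
--
--     for tid in packed:
--         if tid == bos_id:
--             if cur:
--                 samples.append(cur)
--             cur = [bos_id]
--         elif tid == eos_id:
--             cur.append(eos_id)
--             samples.append(cur)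
--             cur = []
--         else:
--             cur.append(tid)
--
--     if cur:
--         samples.append(cur)
--
--     return samples
-- ===== SOURCE B (Python) =====
-- from typing import List
--
-- def unpack_packed_tokens(packed: List[int], bos_id: int, eos_id: int) -> List[List[int]]:
--     # Stage 1: one scan collecting cut positions (gap indices) of the stream.
--     cuts: List[int] = []
--     for i, tid in enumerate(packed):
--         if tid == bos_id:
--             if i > 0:
--                 cuts.append(i)
--         elif tid == eos_id:
--             cuts.append(i + 1)
--
--     # Stage 2: slice the stream at the cut positions (skipping coincident cuts).
--     out: List[List[int]] = []
--     prev = 0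
--     for c in cuts + [len(packed)]:
--         if c > prev:
--             out.append(packed[prev:c])
--             prev = c
--     return out
-- ===== Notes on version B (the rewrite author's own statement) =====
-- stated objective: alternative
-- what changed: Replaces A's incremental flush-on-boundary state machine (samples/cur accumulators) by a two-stage decomposition: one scan collects cut positions (before each non-initial bos, after each eos), then the stream is sliced at those cut points, skipping coincident cuts.
import Mathlib
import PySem

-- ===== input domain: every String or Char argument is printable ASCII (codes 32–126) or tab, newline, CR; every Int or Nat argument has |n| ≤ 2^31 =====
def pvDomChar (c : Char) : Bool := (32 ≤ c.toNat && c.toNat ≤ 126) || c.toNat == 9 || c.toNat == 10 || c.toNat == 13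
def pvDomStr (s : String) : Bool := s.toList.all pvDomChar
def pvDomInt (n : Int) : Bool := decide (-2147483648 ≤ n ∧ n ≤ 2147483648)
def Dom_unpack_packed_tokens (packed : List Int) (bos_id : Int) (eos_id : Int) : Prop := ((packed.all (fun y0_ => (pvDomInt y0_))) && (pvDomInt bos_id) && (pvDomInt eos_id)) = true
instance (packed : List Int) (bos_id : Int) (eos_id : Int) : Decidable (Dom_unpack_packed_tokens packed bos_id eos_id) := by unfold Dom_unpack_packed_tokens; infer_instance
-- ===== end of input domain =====

-- B replaces A's flush-on-boundary accumulator state machine by a two-stage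
-- "collect cut positions, then slice at them" decomposition (objective: alternative, same cost).

-- ===== PORT A =====
-- loop body of A: state = (samples, cur)
def pvStepA (bos_id eos_id : Int) (st : List (List Int) × List Int) (tid : Int) :
    List (List Int) × List Int :=
  if tid = bos_id then
    (if st.2 ≠ [] then st.1 ++ [st.2] else st.1, [bos_id])
  else if tid = eos_id then
    (st.1 ++ [st.2 ++ [eos_id]], [])
  else
    (st.1, st.2 ++ [tid])

def unpack_packed_tokens (packed : List Int) (bos_id : Int) (eos_id : Int) : List (List Int) :=
  let st := packed.foldl (pvStepA bos_id eos_id) ([], [])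
  if st.2 ≠ [] then st.1 ++ [st.2] else st.1

-- ===== PORT B =====
-- stage-1 loop body of B: collect the cut position contributed by (i, tid)
def pvCutStep (bos_id eos_id : Int) (cuts : List Int) (it : Int × Int) : List Int :=
  if it.2 = bos_id then (if it.1 > 0 then cuts ++ [it.1] else cuts)
  else if it.2 = eos_id then cuts ++ [it.1 + 1]
  else cuts

-- stage-2 loop body of B: state = (out, prev); slice packed[prev:c] at each new cut
def pvSliceStep (packed : List Int) (st : List (List Int) × Int) (c : Int) :
    List (List Int) × Int :=
  if c > st.2 then (st.1 ++ [PySem.List.slice packed (some st.2) (some c)], c) else st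

def unpack_packed_tokens_alt (packed : List Int) (bos_id : Int) (eos_id : Int) : List (List Int) :=
  let cuts := (PySem.List.enumerate packed 0).foldl (pvCutStep bos_id eos_id) []
  ((cuts ++ [PySem.List.len packed]).foldl (pvSliceStep packed) ([], 0)).1

-- ===== PRECONDITION & SPEC =====
def Spec_unpack_packed_tokens (packed : List Int) (bos_id : Int) (eos_id : Int) (out : List (List Int)) : Prop := out = unpack_packed_tokens_alt packed bos_id eos_id
instance (packed : List Int) (bos_id : Int) (eos_id : Int) (out : List (List Int)) : Decidable (Spec_unpack_packed_tokens packed bos_id eos_id out) := by unfold Spec_unpack_packed_tokens; infer_instance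

-- ===== CLAIM (what is proved, stated in full; the proofs are below) =====
def Claim_equal_unpack_packed_tokens : Prop := ∀ (packed : List Int) (bos_id : Int) (eos_id : Int), Dom_unpack_packed_tokens packed bos_id eos_id → Spec_unpack_packed_tokens packed bos_id eos_id (unpack_packed_tokens packed bos_id eos_id)

-- ===== LEMMAS AND PROOFS =====

-- proof-side names for the three folds inside the two ports
def pvA (bos_id eos_id : Int) (xs : List Int) : List (List Int) × List Int :=
  xs.foldl (pvStepA bos_id eos_id) ([], [])

def pvCuts (bos_id eos_id : Int) (xs : List Int) : List Int :=
  (PySem.List.enumerate xs 0).foldl (pvCutStep bos_id eos_id) []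

def pvB (bos_id eos_id : Int) (xs : List Int) : List (List Int) × Int :=
  (pvCuts bos_id eos_id xs).foldl (pvSliceStep xs) ([], 0)

lemma pv_slice_append (xs ys : List Int) (a c : Int) (ha : 0 ≤ a) (hc0 : 0 ≤ c)
    (hc : c ≤ (xs.length : Int)) :
    PySem.List.slice (xs ++ ys) (some a) (some c) = PySem.List.slice xs (some a) (some c) := by
  rw [PySem.List.slice_toNat _ ha hc0, PySem.List.slice_toNat _ ha hc0]
  by_cases hac : c ≤ a
  · have : c.toNat ≤ a.toNat := Int.toNat_le_toNat hac
    simp [Nat.sub_eq_zero_of_le this]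
  · have ha' : a.toNat ≤ xs.length := by omega
    rw [List.drop_append_of_le_length ha', List.take_append_of_le_length]
    simp only [List.length_drop]
    omega

lemma pv_slice_drop (xs : List Int) (a : Int) (ha : 0 ≤ a) :
    PySem.List.slice xs (some a) (some (xs.length : Int)) = xs.drop a.toNat := by
  rw [PySem.List.slice_toNat _ ha (by positivity)]
  apply List.take_of_length_le
  simp only [List.length_drop]
  omega

lemma pv_fold_stable (xs ys : List Int) (L : List Int) (st : List (List Int) × Int) (hst : 0 ≤ st.2)
    (hL : ∀ k ∈ L, k ≤ (xs.length : Int)) :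
    L.foldl (pvSliceStep (xs ++ ys)) st = L.foldl (pvSliceStep xs) st := by
  induction L generalizing st with
  | nil => rfl
  | cons c L ih =>
    have hc := hL c (by simp)
    have hstep : pvSliceStep (xs ++ ys) st c = pvSliceStep xs st c := by
      unfold pvSliceStep
      split_ifs with h
      · rw [pv_slice_append xs ys st.2 c hst (le_of_lt (lt_of_le_of_lt hst h)) hc]
      · rfl
    simp only [List.foldl_cons, hstep]
    apply ih
    · unfold pvSliceStep
      split_ifs with h
      · exact le_of_lt (lt_of_le_of_lt hst h)
      · exact hst
    · exact fun k hk => hL k (by simp [hk])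

lemma pv_cuts_append (b e x : Int) (xs : List Int) :
    pvCuts b e (xs ++ [x]) = pvCutStep b e (pvCuts b e xs) ((xs.length : Int), x) := by
  unfold pvCuts
  rw [PySem.List.enumerate_append, List.foldl_append]
  simp [PySem.List.enumerate_cons, PySem.List.enumerate_nil]

lemma pv_stepA_append (b e x : Int) (xs : List Int) :
    pvA b e (xs ++ [x]) = pvStepA b e (pvA b e xs) x := by
  unfold pvA
  rw [List.foldl_append]
  rfl


lemma pv_inv (b e : Int) (xs : List Int) :
    (∀ k ∈ pvCuts b e xs, 0 < k ∧ k ≤ (xs.length : Int)) ∧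
    0 ≤ (pvB b e xs).2 ∧ (pvB b e xs).2 ≤ (xs.length : Int) ∧
    (pvA b e xs).1 = (pvB b e xs).1 ∧
    (pvA b e xs).2 = xs.drop (pvB b e xs).2.toNat := by
  induction xs using List.reverseRecOn with
  | nil =>
    refine ⟨by simp [pvCuts, PySem.List.enumerate_nil], ?_, ?_, ?_, ?_⟩ <;>
      simp [pvB, pvCuts, pvA, PySem.List.enumerate_nil]
  | append_singleton xs x ih =>
    obtain ⟨hK, h0, hle, h1, h2⟩ := ih
    have hlen1 : ((xs ++ [x]).length : Int) = (xs.length : Int) + 1 := by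
      simp [List.length_append]
    have hKB : (pvCuts b e xs).foldl (pvSliceStep (xs ++ [x])) ([], 0) = pvB b e xs :=
      pv_fold_stable xs [x] _ _ (by norm_num) (fun k hk => (hK k hk).2)
    have hBdef : pvB b e (xs ++ [x])
        = (pvCutStep b e (pvCuts b e xs) ((xs.length : Int), x)).foldl
            (pvSliceStep (xs ++ [x])) ([], 0) := by
      unfold pvB
      rw [pv_cuts_append]
    by_cases hxb : x = b
    · by_cases hlen : (0 : Int) < (xs.length : Int)
      · have hne : xs ≠ [] := by rintro rfl; simp at hlen
        have hC : pvCutStep b e (pvCuts b e xs) ((xs.length : Int), x)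
            = pvCuts b e xs ++ [(xs.length : Int)] := by
          simp [pvCutStep, hxb, hne]
        have hB' : pvB b e (xs ++ [x])
            = pvSliceStep (xs ++ [x]) (pvB b e xs) (xs.length : Int) := by
          rw [hBdef, hC, List.foldl_append, hKB]
          rfl
        by_cases hp : (pvB b e xs).2 < (xs.length : Int)
        · have hslice : PySem.List.slice (xs ++ [x]) (some (pvB b e xs).2)
              (some (xs.length : Int)) = (pvA b e xs).2 := by
            rw [pv_slice_append xs [x] _ _ h0 (by omega) le_rfl,
              pv_slice_drop xs _ h0, h2]
          have hB'' : pvB b e (xs ++ [x])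
              = ((pvB b e xs).1 ++ [(pvA b e xs).2], (xs.length : Int)) := by
            rw [hB']
            simp only [pvSliceStep]
            rw [if_pos hp, hslice]
          have hA2ne : (pvA b e xs).2 ≠ [] := by
            rw [h2]
            simp only [ne_eq, List.drop_eq_nil_iff]
            omega
          have hA' : pvA b e (xs ++ [x]) = ((pvA b e xs).1 ++ [(pvA b e xs).2], [b]) := by
            rw [pv_stepA_append]
            simp [pvStepA, hxb, hA2ne]
          refine ⟨?_, ?_, ?_, ?_, ?_⟩
          · intro k hk
            rw [pv_cuts_append, hC] at hk
            rw [hlen1]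
            rcases List.mem_append.1 hk with h | h
            · have := hK k h
              constructor <;> omega
            · simp at h
              omega
          · rw [hB'']
            positivity
          · rw [hB'', hlen1]
            simp
          · rw [hA', hB'', h1]
          · rw [hA', hB'']
            simp only [Int.toNat_natCast]
            rw [List.drop_left, hxb]
        · have hB2 : (pvB b e xs).2 = (xs.length : Int) := by omega
          have hB'' : pvB b e (xs ++ [x]) = pvB b e xs := by
            rw [hB']
            simp only [pvSliceStep]
            rw [if_neg (by omega)]
          have hA2 : (pvA b e xs).2 = [] := by
            rw [h2]
            apply List.drop_eq_nil_of_le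
            omega
          have hA' : pvA b e (xs ++ [x]) = ((pvA b e xs).1, [b]) := by
            rw [pv_stepA_append]
            simp [pvStepA, hxb, hA2]
          refine ⟨?_, ?_, ?_, ?_, ?_⟩
          · intro k hk
            rw [pv_cuts_append, hC] at hk
            rw [hlen1]
            rcases List.mem_append.1 hk with h | h
            · have := hK k h
              constructor <;> omega
            · simp at h
              omega
          · rw [hB'']
            exact h0
          · rw [hB'', hB2, hlen1]
            omega
          · rw [hA', hB'', h1]
          · rw [hA', hB'', hB2]
            simp only [Int.toNat_natCast]
            rw [List.drop_left, hxb]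
      · have hxs : xs = [] := by
          have : xs.length = 0 := by omega
          exact List.eq_nil_of_length_eq_zero this
        subst hxs
        refine ⟨?_, ?_, ?_, ?_, ?_⟩ <;>
          simp [pvCuts, pvB, pvA, pvStepA, pvCutStep, hxb,
            PySem.List.enumerate_cons, PySem.List.enumerate_nil]
    · by_cases hxe : x = e
      · have heb : ¬ e = b := fun h => hxb (hxe.trans h)
        have hC : pvCutStep b e (pvCuts b e xs) ((xs.length : Int), x)
            = pvCuts b e xs ++ [(xs.length : Int) + 1] := by
          simp [pvCutStep, hxe, heb]
        have hB' : pvB b e (xs ++ [x])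
            = pvSliceStep (xs ++ [x]) (pvB b e xs) ((xs.length : Int) + 1) := by
          rw [hBdef, hC, List.foldl_append, hKB]
          rfl
        have hslice : PySem.List.slice (xs ++ [x]) (some (pvB b e xs).2)
            (some ((xs.length : Int) + 1)) = (pvA b e xs).2 ++ [x] := by
          rw [← hlen1, pv_slice_drop (xs ++ [x]) _ h0,
            List.drop_append_of_le_length (by omega), h2]
        have hB'' : pvB b e (xs ++ [x])
            = ((pvB b e xs).1 ++ [(pvA b e xs).2 ++ [x]], (xs.length : Int) + 1) := by
          rw [hB']
          simp only [pvSliceStep]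
          rw [if_pos (by omega), hslice]
        have hA' : pvA b e (xs ++ [x])
            = ((pvA b e xs).1 ++ [(pvA b e xs).2 ++ [e]], []) := by
          rw [pv_stepA_append]
          simp [pvStepA, hxe, heb]
        refine ⟨?_, ?_, ?_, ?_, ?_⟩
        · intro k hk
          rw [pv_cuts_append, hC] at hk
          rw [hlen1]
          rcases List.mem_append.1 hk with h | h
          · have := hK k h
            constructor <;> omega
          · simp at h
            omega
        · rw [hB'']
          omega
        · rw [hB'', hlen1]
        · rw [hA', hB'', h1, hxe]
        · rw [hA', hB'']
          symm
          apply List.drop_eq_nil_of_le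
          simp only [List.length_append, List.length_cons, List.length_nil]
          omega
      · have hC : pvCutStep b e (pvCuts b e xs) ((xs.length : Int), x)
            = pvCuts b e xs := by
          simp [pvCutStep, hxb, hxe]
        have hB'' : pvB b e (xs ++ [x]) = pvB b e xs := by
          rw [hBdef, hC, hKB]
        have hA' : pvA b e (xs ++ [x]) = ((pvA b e xs).1, (pvA b e xs).2 ++ [x]) := by
          rw [pv_stepA_append]
          simp [pvStepA, hxb, hxe]
        refine ⟨?_, ?_, ?_, ?_, ?_⟩
        · intro k hk
          rw [pv_cuts_append, hC] at hk
          have := hK k hk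
          rw [hlen1]
          constructor <;> omega
        · rw [hB'']
          exact h0
        · rw [hB'', hlen1]
          omega
        · rw [hA', hB'', h1]
        · rw [hA', hB'', h2,
            List.drop_append_of_le_length (by omega)]

-- ===== VERDICT (by name: the statement is the Claim_ definition above) =====
theorem unpack_packed_tokens_spec : Claim_equal_unpack_packed_tokens := by
  intro packed b e _
  unfold Spec_unpack_packed_tokens unpack_packed_tokens unpack_packed_tokens_alt
  obtain ⟨hK, h0, hle, h1, h2⟩ := pv_inv b e packed
  rw [PySem.List.len_eq]
  show (if (pvA b e packed).2 ≠ [] then (pvA b e packed).1 ++ [(pvA b e packed).2]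
        else (pvA b e packed).1)
      = ((pvCuts b e packed ++ [(packed.length : Int)]).foldl (pvSliceStep packed) ([], 0)).1
  rw [List.foldl_append]
  change _ = (pvSliceStep packed (pvB b e packed) (packed.length : Int)).1
  by_cases hp : (pvB b e packed).2 < (packed.length : Int)
  · have hne : (pvA b e packed).2 ≠ [] := by
      rw [h2]
      simp only [ne_eq, List.drop_eq_nil_iff]
      omega
    rw [if_pos hne]
    simp only [pvSliceStep]
    rw [if_pos hp, pv_slice_drop packed _ h0, ← h2, h1]
  · have hA2 : (pvA b e packed).2 = [] := by
      rw [h2]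
      apply List.drop_eq_nil_of_le
      omega
    rw [if_neg (by simp [hA2])]
    simp only [pvSliceStep]
    rw [if_neg (by omega), h1]
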